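-- pv_equiv track=rewrite | github.com/Gleb-hub/Python-Tasks | prac1.py | f34
-- ===== SOURCE A (Python) =====
-- def f34 (b: int, n: int, a: int) -> int:
--     x = 0
--     for j in range(1, n + 1):
--         y = 0
--         for c in range(1, b + 1):
--              y += ((34 * j + 41) ** 4 - 93 *(c + 79 + c ** 3) ** 5)
--         x += y
--
--     z = 1
--     for k in range(1, a + 1):
--         w = 0
--         for c in range(1, b + 1):
--             w += (22 * (c - 8) ** 5 - k ** 4)
--         z *= w
--
--     return x - z
-- ===== SOURCE B (Python) =====
-- def f34(b: int, n: int, a: int) -> int: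
--     # Factor the inner c-loops out: each inner sum is an affine function of j (resp. k),
--     # so precompute the c-constants once -> O(b + n + a) instead of O(n*b + a*b).
--     # Each constant is only needed (and only computed) when its outer loop runs.
--     bb = max(b, 0)  # number of iterations of range(1, b+1)
--     c1 = sum(93 * (c + 79 + c ** 3) ** 5 for c in range(1, b + 1)) if n > 0 else 0
--     s2 = sum(22 * (c - 8) ** 5 for c in range(1, b + 1)) if a > 0 else 0
--     x = sum(bb * (34 * j + 41) ** 4 - c1 for j in range(1, n + 1))
--     z = 1
--     for k in range(1, a + 1):
--         z *= s2 - bb * k ** 4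
--     return x - z
-- ===== Notes on version B (the rewrite author's own statement) =====
-- stated objective: faster
-- what changed: The inner c-loops are factored out: the c-dependent sums are precomputed once and each outer iteration becomes a closed affine expression, turning O(n*b + a*b) into O(n + a + b).
import Mathlib
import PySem

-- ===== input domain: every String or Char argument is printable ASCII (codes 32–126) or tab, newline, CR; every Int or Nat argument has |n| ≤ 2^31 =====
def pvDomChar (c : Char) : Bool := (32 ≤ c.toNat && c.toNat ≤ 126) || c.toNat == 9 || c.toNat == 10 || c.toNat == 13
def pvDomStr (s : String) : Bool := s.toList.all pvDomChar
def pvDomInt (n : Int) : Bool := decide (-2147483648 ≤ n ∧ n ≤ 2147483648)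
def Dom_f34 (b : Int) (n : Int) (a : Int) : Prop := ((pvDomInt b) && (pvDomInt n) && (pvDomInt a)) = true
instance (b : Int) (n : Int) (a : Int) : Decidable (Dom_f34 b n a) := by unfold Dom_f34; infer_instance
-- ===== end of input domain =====

-- B factors the inner c-loops into precomputed constants (faster: O(n+a+b) vs O(n*b+a*b)).

-- ===== PORT A =====
def f34 (b : Int) (n : Int) (a : Int) : Int :=
  let x := (PySem.List.pyRange 1 (n + 1) 1).foldl (fun x j =>
    x + (PySem.List.pyRange 1 (b + 1) 1).foldl
      (fun y c => y + ((34 * j + 41) ^ 4 - 93 * (c + 79 + c ^ 3) ^ 5)) 0) 0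
  let z := (PySem.List.pyRange 1 (a + 1) 1).foldl (fun z k =>
    z * (PySem.List.pyRange 1 (b + 1) 1).foldl
      (fun w c => w + (22 * (c - 8) ^ 5 - k ^ 4)) 0) 1
  x - z

-- ===== PORT B =====
def f34_alt (b : Int) (n : Int) (a : Int) : Int :=
  let bb : Int := max b 0
  let c1 := if 0 < n then ((PySem.List.pyRange 1 (b + 1) 1).map (fun c => 93 * (c + 79 + c ^ 3) ^ 5)).sum else 0
  let s2 := if 0 < a then ((PySem.List.pyRange 1 (b + 1) 1).map (fun c => 22 * (c - 8) ^ 5)).sum else 0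
  let x := ((PySem.List.pyRange 1 (n + 1) 1).map (fun j => bb * (34 * j + 41) ^ 4 - c1)).sum
  let z := (PySem.List.pyRange 1 (a + 1) 1).foldl (fun z k => z * (s2 - bb * k ^ 4)) 1
  x - z

-- ===== PRECONDITION & SPEC =====
def Spec_f34 (b : Int) (n : Int) (a : Int) (out : Int) : Prop := out = f34_alt b n a
instance (b : Int) (n : Int) (a : Int) (out : Int) : Decidable (Spec_f34 b n a out) := by unfold Spec_f34; infer_instance

-- ===== CLAIM (what is proved, stated in full; the proofs are below) =====
def Claim_equal_f34 : Prop := ∀ (b : Int) (n : Int) (a : Int), Dom_f34 b n a → Spec_f34 b n a (f34 b n a)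

-- ===== LEMMAS AND PROOFS =====

-- foldl-accumulated sum = init + sum of the mapped list
theorem foldl_add_map_sum (F : Int → Int) (L : List Int) (init : Int) :
    L.foldl (fun y c => y + F c) init = init + (L.map F).sum := by
  induction L generalizing init with
  | nil => simp
  | cons c L ih => simp [List.foldl_cons, ih (init + F c)]; ring

-- sum of (K - Q c) over a list = length·K - sum of Q
theorem sum_map_const_sub (K : Int) (Q : Int → Int) (L : List Int) :
    (L.map (fun c => K - Q c)).sum = (L.length : Int) * K - (L.map Q).sum := by
  induction L with
  | nil => simp
  | cons c L ih => simp [ih]; ring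

-- sum of (Q c - K) over a list = sum of Q - length·K
theorem sum_map_sub_const (K : Int) (Q : Int → Int) (L : List Int) :
    (L.map (fun c => Q c - K)).sum = (L.map Q).sum - (L.length : Int) * K := by
  induction L with
  | nil => simp
  | cons c L ih => simp [ih]; ring

theorem length_range_b (b : Int) :
    ((PySem.List.pyRange 1 (b + 1) 1).length : Int) = max b 0 := by
  rw [PySem.List.length_pyRange_one]
  have : b + 1 - 1 = b := by ring
  rw [this, Int.toNat_eq_max]

-- ===== VERDICT (by name: the statement is the Claim_ definition above) =====
theorem f34_spec : Claim_equal_f34 := by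
  intro b n a _
  unfold Spec_f34 f34 f34_alt
  simp only []
  congr 1
  · -- x parts
    by_cases hn : 0 < n
    case neg =>
      rw [PySem.List.pyRange_one_eq_nil (a := 1) (b := n + 1) (by omega)]
      simp
    rw [if_pos hn, foldl_add_map_sum]
    simp only [zero_add]
    congr 1
    apply List.map_congr_left
    intro j _
    rw [foldl_add_map_sum]
    simp only [zero_add]
    rw [sum_map_const_sub ((34 * j + 41) ^ 4) (fun c => 93 * (c + 79 + c ^ 3) ^ 5)]
    rw [length_range_b]
  · -- z parts
    by_cases ha : 0 < a
    case neg =>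
      rw [PySem.List.pyRange_one_eq_nil (a := 1) (b := a + 1) (by omega)]
      simp
    rw [if_pos ha]
    apply PySem.List.foldl_congr_mem
    intro z k _
    congr 1
    rw [foldl_add_map_sum]
    simp only [zero_add]
    rw [sum_map_sub_const (k ^ 4) (fun c => 22 * (c - 8) ^ 5)]
    rw [length_range_b]
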